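-- pv_equiv track=rewrite | github.com/willwade/WorldAlphabets | scripts/build_top200_unified.py | choose_corpus
-- ===== SOURCE A (Python) =====
-- from typing import Dict, List, Optional, Set, Tuple
--
-- def choose_corpus(corpora: List[str]) -> Optional[str]:
--     """Choose the best corpus from available options based on priority."""
--     if not corpora:
--         return None
--
--     priority = ["_community_", "_news_", "_mixed_", "_web_", "_newscrawl_", "_wikipedia_"]
--     for token in priority:
--         for corpus_id in corpora:
--             if token in corpus_id:
--                 return corpus_id
--     return corpora[0]
-- ===== SOURCE B (Python) =====
-- def choose_corpus(corpora):
--     """Choose the best corpus from available options based on priority."""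
--     if not corpora:
--         return None
--
--     priority = ["_community_", "_news_", "_mixed_", "_web_", "_newscrawl_", "_wikipedia_"]
--     best = None
--     best_rank = len(priority) + 1
--     for corpus_id in corpora:
--         rank = next((i for i, tok in enumerate(priority) if tok in corpus_id),
--                     len(priority))
--         if rank < best_rank:
--             best = corpus_id
--             best_rank = rank
--     return best
-- ===== Notes on version B (the rewrite author's own statement) =====
-- stated objective: alternative
-- what changed: Replaced A's token-major nested scan (try each priority token over the whole corpora list, return the first hit) by a single corpus-major pass computing each corpus's rank (index of first contained priority token, len(priority) if none) and tracking the strict argmin, so each corpus is visited once.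
import Mathlib
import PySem

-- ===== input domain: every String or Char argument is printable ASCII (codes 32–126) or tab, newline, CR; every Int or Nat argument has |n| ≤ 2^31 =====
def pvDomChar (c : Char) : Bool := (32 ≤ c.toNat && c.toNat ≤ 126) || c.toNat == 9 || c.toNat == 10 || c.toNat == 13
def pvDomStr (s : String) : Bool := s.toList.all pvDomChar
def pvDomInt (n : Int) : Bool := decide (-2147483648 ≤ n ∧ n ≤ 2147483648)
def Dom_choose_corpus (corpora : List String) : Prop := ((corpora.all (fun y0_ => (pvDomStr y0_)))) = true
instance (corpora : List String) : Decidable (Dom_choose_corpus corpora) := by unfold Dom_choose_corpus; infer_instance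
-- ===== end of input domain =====

-- B replaces A's token-major nested scan by one corpus-major pass tracking the argmin rank (alternative decomposition, same cost).

-- ===== PORT A =====
-- token-major: for each priority token in order, scan corpora and return the first corpus containing it
def choose_corpus (corpora : List String) : Option String :=
  if corpora = [] then none
  else
    let priority := ["_community_", "_news_", "_mixed_", "_web_", "_newscrawl_", "_wikipedia_"]
    match priority.findSome? (fun token => corpora.find? (fun corpus_id => PySem.Str.isIn token corpus_id)) with
    | some corpus_id => some corpus_id
    | none => PySem.List.pyGet? corpora 0

-- ===== PORT B =====
-- corpus-major: one pass, rank = index of first contained priority token (len(priority) if none), strict argmin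
def choose_corpus_alt (corpora : List String) : Option String :=
  if corpora = [] then none
  else
    let priority := ["_community_", "_news_", "_mixed_", "_web_", "_newscrawl_", "_wikipedia_"]
    (corpora.foldl
      (fun (st : Option String × Nat) corpus_id =>
        let rank := (priority.findIdx? (fun tok => PySem.Str.isIn tok corpus_id)).getD priority.length
        if rank < st.2 then (some corpus_id, rank) else st)
      (none, priority.length + 1)).1

-- ===== PRECONDITION & SPEC =====
def Spec_choose_corpus (corpora : List String) (out : Option String) : Prop := out = choose_corpus_alt corpora
instance (corpora : List String) (out : Option String) : Decidable (Spec_choose_corpus corpora out) := by unfold Spec_choose_corpus; infer_instance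

-- ===== CLAIM (what is proved, stated in full; the proofs are below) =====
def Claim_equal_choose_corpus : Prop := ∀ (corpora : List String), Dom_choose_corpus corpora → Spec_choose_corpus corpora (choose_corpus corpora)

-- ===== LEMMAS AND PROOFS =====

-- rank of c w.r.t. a list of predicates: index of the first predicate c satisfies, ps.length if none
def pvRk {α : Type} (ps : List (α → Bool)) (c : α) : Nat :=
  (ps.findIdx? (fun p => p c)).getD ps.length

-- minimum rank over cs, with sentinel base ps.length + 1
def pvM {α : Type} (ps : List (α → Bool)) (cs : List α) : Nat :=
  cs.foldr (fun c a => min (pvRk ps c) a) (ps.length + 1)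

theorem pvRk_le {α : Type} (ps : List (α → Bool)) (c : α) : pvRk ps c ≤ ps.length := by
  unfold pvRk
  cases h : ps.findIdx? (fun p => p c) with
  | none => simp
  | some i => simpa using Nat.le_of_lt (List.findIdx?_eq_some_iff_findIdx_eq.mp h).1

theorem pvRk_cons {α : Type} (p : α → Bool) (ps : List (α → Bool)) (c : α) :
    pvRk (p :: ps) c = if p c then 0 else pvRk ps c + 1 := by
  unfold pvRk
  rw [List.findIdx?_cons]
  by_cases h : p c
  · simp [h]
  · simp only [h, if_neg, Bool.false_eq_true, if_false]
    cases ps.findIdx? (fun q => q c) <;> simp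

theorem pv_find?_congr {α : Type} (l : List α) (p q : α → Bool)
    (h : ∀ x ∈ l, p x = q x) : l.find? p = l.find? q := by
  induction l with
  | nil => rfl
  | cons x xs ih =>
    simp only [List.find?_cons]
    rw [h x (by simp)]
    cases q x
    · exact ih (fun y hy => h y (by simp [hy]))
    · rfl

theorem pv_foldr_min_congr {α : Type} (cs : List α) (g g' : α → Nat) (b : Nat)
    (h : ∀ c ∈ cs, g c = g' c) :
    cs.foldr (fun c a => min (g c) a) b = cs.foldr (fun c a => min (g' c) a) b := by
  induction cs with
  | nil => rfl
  | cons c cs ih =>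
    simp only [List.foldr_cons]
    rw [h c (by simp), ih (fun y hy => h y (by simp [hy]))]

theorem pv_foldr_min_shift {α : Type} (cs : List α) (g : α → Nat) (b : Nat) :
    cs.foldr (fun c a => min (g c + 1) a) (b + 1)
      = cs.foldr (fun c a => min (g c) a) b + 1 := by
  induction cs with
  | nil => rfl
  | cons c cs ih => simp only [List.foldr_cons, ih, Nat.succ_min_succ]

theorem pvM_le_rk {α : Type} (ps : List (α → Bool)) (cs : List α) (c : α) (hc : c ∈ cs) :
    pvM ps cs ≤ pvRk ps c := by
  induction cs with
  | nil => cases hc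
  | cons x xs ih =>
    rcases List.mem_cons.mp hc with h | h
    · subst h; exact Nat.min_le_left _ _
    · exact Nat.le_trans (Nat.min_le_right _ _) (ih h)

theorem pvM_attained {α : Type} (ps : List (α → Bool)) (cs : List α) (h : cs ≠ []) :
    ∃ c ∈ cs, pvRk ps c = pvM ps cs := by
  induction cs with
  | nil => exact absurd rfl h
  | cons x xs ih =>
    cases xs with
    | nil =>
      refine ⟨x, by simp, ?_⟩
      have := pvRk_le ps x
      simp only [pvM, List.foldr_cons, List.foldr_nil]
      omega
    | cons y ys =>
      obtain ⟨c, hc, hrk⟩ := ih (by simp)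
      have hM : pvM ps (x :: y :: ys) = min (pvRk ps x) (pvM ps (y :: ys)) := rfl
      by_cases hle : pvRk ps x ≤ pvM ps (y :: ys)
      · exact ⟨x, by simp, by omega⟩
      · exact ⟨c, by simp [List.mem_cons.mp hc], by omega⟩

-- token-major nested scan = first-argmin over ranks
theorem pv_tokmaj {α : Type} (ps : List (α → Bool)) (cs : List α) :
    ps.findSome? (fun p => cs.find? p)
      = if pvM ps cs < ps.length then cs.find? (fun c => pvRk ps c == pvM ps cs) else none := by
  induction ps generalizing cs with
  | nil =>
    have : ¬ pvM [] cs < 0 := by omega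
    simp [this]
  | cons p ps ih =>
    rw [List.findSome?_cons]
    cases hf : cs.find? p with
    | some c0 =>
      have hmem : c0 ∈ cs := List.mem_of_find?_eq_some hf
      have hp : p c0 = true := List.find?_some hf
      have hrk0 : pvRk (p :: ps) c0 = 0 := by rw [pvRk_cons, hp]; rfl
      have hM0 : pvM (p :: ps) cs = 0 := by
        have := pvM_le_rk (p :: ps) cs c0 hmem; omega
      rw [hM0]
      have hcond : 0 < (p :: ps).length := by simp
      rw [if_pos hcond]
      rw [pv_find?_congr cs _ p (by
        intro x hx
        rw [pvRk_cons]
        by_cases hpx : p x <;> simp [hpx])]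
      simp [hf]
    | none =>
      have hno : ∀ x ∈ cs, p x = false := by
        intro x hx
        have := List.find?_eq_none.mp hf x hx
        simpa using this
      have hrk : ∀ x ∈ cs, pvRk (p :: ps) x = pvRk ps x + 1 := by
        intro x hx; rw [pvRk_cons, hno x hx]; rfl
      have hM : pvM (p :: ps) cs = pvM ps cs + 1 := by
        unfold pvM
        rw [pv_foldr_min_congr cs _ (fun c => pvRk ps c + 1) _ hrk]
        simpa [List.length_cons] using pv_foldr_min_shift cs (fun c => pvRk ps c) (ps.length + 1)
      rw [ih cs, hM]
      have hcondeq : (pvM ps cs + 1 < (p :: ps).length) ↔ (pvM ps cs < ps.length) := by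
        simp
      by_cases hc : pvM ps cs < ps.length
      · rw [if_pos hc, if_pos (hcondeq.mpr hc)]
        exact pv_find?_congr cs _ _ (by
          intro x hx
          rw [hrk x hx]
          simp)
      · rw [if_neg hc, if_neg (fun h => hc (hcondeq.mp h))]

-- the strict-argmin fold = first-argmin over ranks (threshold br)
theorem pv_bfold {α : Type} (ps : List (α → Bool)) (cs : List α) (bc : Option α) (br : Nat)
    (hbr : br ≤ ps.length + 1) :
    (cs.foldl
      (fun (st : Option α × Nat) c =>
        if pvRk ps c < st.2 then (some c, pvRk ps c) else st)
      (bc, br)).1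
      = if pvM ps cs < br then cs.find? (fun c => pvRk ps c == pvM ps cs) else bc := by
  induction cs generalizing bc br with
  | nil =>
    have : ¬ pvM ps [] < br := by unfold pvM; simp; omega
    simp [this]
  | cons c cs ih =>
    have hMc : pvM ps (c :: cs) = min (pvRk ps c) (pvM ps cs) := rfl
    simp only [List.foldl_cons]
    by_cases hlt : pvRk ps c < br
    · rw [if_pos hlt]
      rw [ih (some c) (pvRk ps c) (by have := pvRk_le ps c; omega)]
      by_cases h2 : pvM ps cs < pvRk ps c
      · have hMeq : pvM ps (c :: cs) = pvM ps cs := by rw [hMc]; omega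
        rw [if_pos h2, hMeq, if_pos (by omega)]
        rw [List.find?_cons]
        have : (pvRk ps c == pvM ps cs) = false := by simp; omega
        rw [this]
      · have hMeq : pvM ps (c :: cs) = pvRk ps c := by rw [hMc]; omega
        rw [if_neg h2, hMeq, if_pos hlt]
        rw [List.find?_cons]
        have : (pvRk ps c == pvRk ps c) = true := by simp
        rw [this]
    · rw [if_neg hlt]
      rw [ih bc br hbr]
      have hMeq : pvM ps (c :: cs) = min (pvRk ps c) (pvM ps cs) := hMc
      by_cases h2 : pvM ps cs < br
      · have : pvM ps (c :: cs) = pvM ps cs := by rw [hMc]; omega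
        rw [this, if_pos h2, if_pos h2]
        rw [List.find?_cons]
        have : (pvRk ps c == pvM ps cs) = false := by simp; omega
        rw [this]
      · rw [if_neg h2, if_neg (by rw [hMc]; omega)]

-- findIdx? through map
theorem pv_findIdx?_map {α β : Type} (f : α → β) (l : List α) (q : β → Bool) :
    (l.map f).findIdx? q = l.findIdx? (fun x => q (f x)) := by
  induction l with
  | nil => rfl
  | cons x xs ih =>
    simp only [List.map_cons, List.findIdx?_cons, ih]

-- findSome? through map
theorem pv_findSome?_map {α β γ : Type} (f : α → β) (l : List α) (g : β → Option γ) :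
    (l.map f).findSome? g = l.findSome? (fun x => g (f x)) := by
  induction l with
  | nil => rfl
  | cons x xs ih => simp only [List.map_cons, List.findSome?_cons, ih]

-- ===== VERDICT (by name: the statement is the Claim_ definition above) =====
theorem choose_corpus_spec : Claim_equal_choose_corpus := by
  intro corpora _
  unfold Spec_choose_corpus choose_corpus choose_corpus_alt
  cases corpora with
  | nil => rfl
  | cons c0 cs' =>
    simp only [if_neg (List.cons_ne_nil c0 cs')]
    set P : List String := ["_community_", "_news_", "_mixed_", "_web_", "_newscrawl_", "_wikipedia_"] with hP
    set ps : List (String → Bool) := P.map (fun t c => PySem.Str.isIn t c) with hps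
    have hlen : ps.length = P.length := by rw [hps, List.length_map]
    have hA : P.findSome? (fun token => (c0 :: cs').find? (fun cid => PySem.Str.isIn token cid))
        = ps.findSome? (fun p => (c0 :: cs').find? p) := by
      rw [hps, pv_findSome?_map]
    have hrk : ∀ cid, (P.findIdx? (fun tok => PySem.Str.isIn tok cid)).getD P.length = pvRk ps cid := by
      intro cid
      rw [pvRk, hps, pv_findIdx?_map, List.length_map]
    have hB : ((c0 :: cs').foldl
        (fun (st : Option String × Nat) cid =>
          let rank := (P.findIdx? (fun tok => PySem.Str.isIn tok cid)).getD P.length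
          if rank < st.2 then (some cid, rank) else st)
        (none, P.length + 1)).1
        = ((c0 :: cs').foldl
        (fun (st : Option String × Nat) cid =>
          if pvRk ps cid < st.2 then (some cid, pvRk ps cid) else st)
        (none, ps.length + 1)).1 := by
      have hfun : (fun (st : Option String × Nat) cid =>
          let rank := (P.findIdx? (fun tok => PySem.Str.isIn tok cid)).getD P.length
          if rank < st.2 then (some cid, rank) else st)
        = (fun (st : Option String × Nat) cid =>
          if pvRk ps cid < st.2 then (some cid, pvRk ps cid) else st) := by
        funext st cid
        simp only [hrk cid]
      rw [hlen, hfun]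
    rw [hA, hB, pv_tokmaj, pv_bfold ps (c0 :: cs') none (ps.length + 1) (Nat.le_refl _)]
    have hne : (c0 :: cs') ≠ [] := List.cons_ne_nil c0 cs'
    obtain ⟨w, hw, hwrk⟩ := pvM_attained ps (c0 :: cs') hne
    have hMle : pvM ps (c0 :: cs') ≤ ps.length := hwrk ▸ pvRk_le ps w
    by_cases hc : pvM ps (c0 :: cs') < ps.length
    · rw [if_pos hc, if_pos (by omega)]
      cases hf : (c0 :: cs').find? (fun c => pvRk ps c == pvM ps (c0 :: cs')) with
      | some x => rfl
      | none =>
        exfalso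
        have := List.find?_eq_none.mp hf w hw
        simp [hwrk] at this
    · rw [if_neg hc, if_pos (by omega)]
      have hM0 : pvRk ps c0 = pvM ps (c0 :: cs') := by
        have h1 := pvM_le_rk ps (c0 :: cs') c0 (by simp)
        have h2 := pvRk_le ps c0
        omega
      rw [List.find?_cons]
      have : (pvRk ps c0 == pvM ps (c0 :: cs')) = true := by simp [hM0]
      rw [this]
      simp [PySem.List.pyGet?, PySem.List.pyIdx?]
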